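-- pv_equiv track=rewrite | github.com/art-from-the-machine/Mantella | src/remember/summaries.py | get_new_events
-- ===== SOURCE A (Python) =====
-- from typing import Dict, List, Tuple
--
-- def get_new_events(
--     timestamped_summary_blocks: List[Tuple[int, str]],
--     dynamic_tag_events: List[Tuple[int, str]],
-- ) -> List[Tuple[int, str]]:
--     """Return dynamic tag events newer than the latest summary block.
--
--     An event is considered *new* if its timestamp is strictly greater than
--     the latest timestamped summary block.  If there are no timestamped
--     summary blocks the baseline is ``0``, so all dynamic events qualify.
--
--     Returns a list of ``(timestamp, text)`` pairs sorted by timestamp.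
--     """
--     if not dynamic_tag_events:
--         return []
--
--     latest_summary_ts = max((ts for ts, _ in timestamped_summary_blocks), default=0)
--     return sorted(
--         [(ts, text) for ts, text in dynamic_tag_events if ts > latest_summary_ts],
--         key=lambda item: item[0],
--     )
-- ===== SOURCE B (Python) =====
-- from typing import Dict, List, Tuple
--
-- def get_new_events(
--     timestamped_summary_blocks: List[Tuple[int, str]],
--     dynamic_tag_events: List[Tuple[int, str]],
-- ) -> List[Tuple[int, str]]:
--     # Bucket the qualifying events by timestamp in a dict (insertion order
--     # preserves the original order of ties), then emit the buckets in order
--     # of sorted DISTINCT timestamps: only the distinct keys are sorted,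
--     # never whole event tuples.
--     if not dynamic_tag_events:
--         return []
--
--     latest_summary_ts = max((ts for ts, _ in timestamped_summary_blocks), default=0)
--
--     groups: Dict[int, List[str]] = {}
--     for ts, text in dynamic_tag_events:
--         if ts > latest_summary_ts:
--             groups.setdefault(ts, []).append(text)
--
--     return [(ts, text) for ts in sorted(groups) for text in groups[ts]]
-- ===== Notes on version B (the rewrite author's own statement) =====
-- stated objective: alternative
-- what changed: A filters the events and sorts the surviving (timestamp, text) tuples; B instead groups qualifying events into a timestamp-keyed dict of text buckets in one pass and concatenates the buckets in order of the sorted distinct timestamps (a bucket/group-by pass; only distinct keys are sorted).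
import Mathlib
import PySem

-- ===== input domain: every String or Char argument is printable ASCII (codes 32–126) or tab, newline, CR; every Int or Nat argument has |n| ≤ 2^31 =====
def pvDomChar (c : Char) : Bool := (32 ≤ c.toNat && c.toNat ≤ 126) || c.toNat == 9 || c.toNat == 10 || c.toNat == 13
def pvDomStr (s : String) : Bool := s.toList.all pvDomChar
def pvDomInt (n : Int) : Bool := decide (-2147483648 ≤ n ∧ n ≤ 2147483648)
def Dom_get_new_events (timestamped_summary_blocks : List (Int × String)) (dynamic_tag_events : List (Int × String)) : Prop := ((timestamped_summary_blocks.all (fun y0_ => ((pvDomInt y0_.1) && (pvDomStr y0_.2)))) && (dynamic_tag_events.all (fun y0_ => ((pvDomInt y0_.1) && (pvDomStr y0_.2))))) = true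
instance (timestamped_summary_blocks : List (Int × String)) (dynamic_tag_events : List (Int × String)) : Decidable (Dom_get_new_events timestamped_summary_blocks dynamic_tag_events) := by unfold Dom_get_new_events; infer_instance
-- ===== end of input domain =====

-- B replaces A's filter-then-sort over event tuples by a one-pass group-by-timestamp
-- dict of text buckets emitted in order of the sorted distinct timestamps (alternative decomposition).

-- ===== PORT A =====
-- max((ts for ts, _ in blocks), default=0)
def pvMaxDefault0 (l : List Int) : Int :=
  match PySem.List.max? l (fun x => x) with
  | some m => m
  | none => 0

def get_new_events (timestamped_summary_blocks : List (Int × String)) (dynamic_tag_events : List (Int × String)) : List (Int × String) :=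
  if dynamic_tag_events = [] then []
  else
    let latest_summary_ts : Int := pvMaxDefault0 (timestamped_summary_blocks.map (fun p => p.1))
    PySem.List.sorted
      (dynamic_tag_events.filter (fun e => decide (e.1 > latest_summary_ts)))
      (fun e => e.1) false

-- ===== PORT B =====
def get_new_events_alt (timestamped_summary_blocks : List (Int × String)) (dynamic_tag_events : List (Int × String)) : List (Int × String) :=
  if dynamic_tag_events = [] then []
  else
    let latest_summary_ts : Int := pvMaxDefault0 (timestamped_summary_blocks.map (fun p => p.1))
    -- for ts, text in events: if ts > latest: groups.setdefault(ts, []).append(text)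
    let groups : PySem.Dict Int (List String) :=
      dynamic_tag_events.foldl
        (fun d e =>
          if decide (e.1 > latest_summary_ts) then
            PySem.Dict.modify d e.1 [] (fun l => l ++ [e.2])
          else d)
        PySem.Dict.empty
    -- [(ts, text) for ts in sorted(groups) for text in groups[ts]]
    (PySem.List.sorted (PySem.Dict.keys groups) (fun k => k) false).flatMap
      (fun k => (PySem.Dict.getD groups k []).map (fun text => (k, text)))

-- ===== PRECONDITION & SPEC =====
def Spec_get_new_events (timestamped_summary_blocks : List (Int × String)) (dynamic_tag_events : List (Int × String)) (out : List (Int × String)) : Prop := out = get_new_events_alt timestamped_summary_blocks dynamic_tag_events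
instance (timestamped_summary_blocks : List (Int × String)) (dynamic_tag_events : List (Int × String)) (out : List (Int × String)) : Decidable (Spec_get_new_events timestamped_summary_blocks dynamic_tag_events out) := by unfold Spec_get_new_events; infer_instance

-- ===== CLAIM (what is proved, stated in full; the proofs are below) =====
def Claim_equal_get_new_events : Prop := ∀ (timestamped_summary_blocks : List (Int × String)) (dynamic_tag_events : List (Int × String)), Dom_get_new_events timestamped_summary_blocks dynamic_tag_events → Spec_get_new_events timestamped_summary_blocks dynamic_tag_events (get_new_events timestamped_summary_blocks dynamic_tag_events)

-- ===== LEMMAS AND PROOFS =====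

-- a fold whose body is guarded by 'if p e' is the fold over the filtered list
theorem pv_foldl_if_filter {D E : Type} (f : D → E → D) (p : E → Bool) (l : List E) (d : D) :
    l.foldl (fun d e => if p e then f d e else d) d = (l.filter p).foldl f d := by
  induction l generalizing d with
  | nil => rfl
  | cons e l ih =>
      by_cases h : p e <;> simp [h, ih]

-- insertBy skips a prefix it never inserts before
theorem pv_insertBy_append {α : Type} (before : α → α → Bool) (x : α) (A B : List α)
    (h : ∀ a ∈ A, before x a = false) :
    PySem.List.insertBy before x (A ++ B) = A ++ PySem.List.insertBy before x B := by
  induction A with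
  | nil => rfl
  | cons a A ih =>
      have ha := h a List.mem_cons_self
      simp only [List.cons_append, PySem.List.insertBy, ha, Bool.false_eq_true, if_false]
      rw [ih (fun a ha' => h a (List.mem_cons_of_mem _ ha'))]

-- insertBy goes to the front when it inserts before every element
theorem pv_insertBy_front {α : Type} (before : α → α → Bool) (x : α) (B : List α)
    (h : ∀ b ∈ B, before x b = true) :
    PySem.List.insertBy before x B = x :: B := by
  cases B with
  | nil => rfl
  | cons b B => simp [PySem.List.insertBy, h b List.mem_cons_self]

-- inserting x into a strictly-key-sorted grouped expansion appends it to its bucket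
theorem pv_insert_expansion (ks : List Int) (b : Int → List (Int × String)) (x : Int × String)
    (hs : ks.Pairwise (· < ·)) (hx : x.1 ∈ ks) (hb : ∀ k, ∀ e ∈ b k, e.1 = k) :
    PySem.List.insertBy (fun a b => decide (a.1 < b.1)) x (ks.flatMap b)
      = ks.flatMap (fun k => b k ++ if k = x.1 then [x] else []) := by
  induction ks with
  | nil => cases hx
  | cons k ks ih =>
      have hlt := (List.pairwise_cons.mp hs).1
      have hs' := (List.pairwise_cons.mp hs).2
      rw [List.flatMap_cons, List.flatMap_cons]
      by_cases hk : k = x.1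
      · -- insert right after bucket k, before all of ks's expansion
        have h1 : ∀ a ∈ b k, (decide (x.1 < a.1)) = false := by
          intro a ha
          rw [hb k a ha]
          simp [hk]
        have h2 : ∀ y ∈ ks.flatMap b, (decide (x.1 < y.1)) = true := by
          intro y hy
          rcases List.mem_flatMap.mp hy with ⟨k', hk', hmem⟩
          rw [hb k' y hmem]
          exact decide_eq_true (hk ▸ hlt _ hk')
        rw [pv_insertBy_append _ _ _ _ h1, pv_insertBy_front _ _ _ h2]
        have hrest : ks.flatMap (fun k' => b k' ++ if k' = x.1 then [x] else [])
            = ks.flatMap b := by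
          apply List.flatMap_congr
          intro k' hk'
          have : k' ≠ x.1 := by
            intro h; exact absurd (hk ▸ h ▸ hlt k' hk') (lt_irrefl _)
          simp [this]
        rw [hrest, if_pos hk]
        simp
      · -- x's key is further right
        have hx' : x.1 ∈ ks := by
          rcases List.mem_cons.mp hx with h | h
          · exact absurd h.symm hk
          · exact h
        have h1 : ∀ a ∈ b k, (decide (x.1 < a.1)) = false := by
          intro a ha
          rw [hb k a ha]
          simp [not_lt_of_gt (hlt _ hx')]
        rw [pv_insertBy_append _ _ _ _ h1, ih hs' hx']
        rw [if_neg hk]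
        simp

-- core: the grouped expansion over any strictly increasing key list covering F equals the stable sort of F
theorem pv_group_sort (F : List (Int × String)) (ks : List Int)
    (hs : ks.Pairwise (· < ·)) (hcov : ∀ e ∈ F, e.1 ∈ ks) :
    ks.flatMap (fun k => ((F.filter (fun e => e.1 == k)).map (fun e => (k, e.2))))
      = PySem.List.sorted F (fun e => e.1) false := by
  induction F using List.reverseRecOn with
  | nil =>
      rw [show PySem.List.sorted ([] : List (Int × String)) (fun e => e.1) false = [] from rfl]
      simp
  | append_singleton F x ih =>
      have hcovF : ∀ e ∈ F, e.1 ∈ ks := fun e he => hcov e (List.mem_append_left _ he)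
      have hxk : x.1 ∈ ks := hcov x (List.mem_append_right _ List.mem_cons_self)
      have hstep :
          PySem.List.sorted (F ++ [x]) (fun e => e.1) false
            = PySem.List.insertBy (fun a b => decide (a.1 < b.1)) x
                (PySem.List.sorted F (fun e => e.1) false) := by
        rw [PySem.List.sorted_eq_foldl_insertBy, PySem.List.sorted_eq_foldl_insertBy,
          List.foldl_append]
        rfl
      have hsplit : ks.flatMap (fun k => (((F ++ [x]).filter (fun e => e.1 == k)).map (fun e => (k, e.2))))
          = ks.flatMap (fun k => ((F.filter (fun e => e.1 == k)).map (fun e => (k, e.2)))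
              ++ if k = x.1 then [x] else []) := by
        apply List.flatMap_congr
        intro k _
        rw [List.filter_append, List.map_append]
        congr 1
        by_cases h : x.1 = k
        · obtain ⟨x1, x2⟩ := x
          cases h
          simp
        · have hbe : (x.1 == k) = false := by simp [h]
          simp [hbe, Ne.symm h]
      rw [hstep, ← ih hcovF, hsplit]
      exact (pv_insert_expansion ks _ x hs hxk
        (by
          intro k e he
          rcases List.mem_map.mp he with ⟨e', _, rfl⟩
          rfl)).symm

-- pairwise ≤ plus nodup gives pairwise <
theorem pv_pairwise_lt_of_le_nodup (l : List Int)
    (hle : l.Pairwise (· ≤ ·)) (hnd : l.Nodup) : l.Pairwise (· < ·) := by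
  have := List.Pairwise.and hle hnd
  exact this.imp (fun h => lt_of_le_of_ne h.1 h.2)

-- ===== VERDICT (by name: the statement is the Claim_ definition above) =====
theorem get_new_events_spec : Claim_equal_get_new_events := by
  intro blocks events _
  unfold Spec_get_new_events
  by_cases hev : events = []
  · simp [get_new_events, get_new_events_alt, hev]
  · simp only [get_new_events, get_new_events_alt, hev, if_false]
    set t : Int := pvMaxDefault0 (blocks.map (fun p => p.1)) with ht
    set F : List (Int × String) := events.filter (fun e => decide (e.1 > t)) with hF
    -- the B-side fold is the group-by fold over F
    rw [pv_foldl_if_filter (fun d (e : Int × String) =>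
          PySem.Dict.modify d e.1 [] (fun l => l ++ [e.2]))
        (fun e => decide (e.1 > t)) events PySem.Dict.empty]
    set G : PySem.Dict Int (List String) :=
      F.foldl (fun d e => PySem.Dict.modify d e.1 [] (fun l => l ++ [e.2])) PySem.Dict.empty
      with hG
    have hkeys_nd : (PySem.Dict.keys G).Nodup := by
      rw [hG]
      exact PySem.Dict.nodup_keys_foldl_modify_key F (fun e => e.1) []
        (fun d e => fun l => l ++ [e.2]) PySem.Dict.empty PySem.Dict.nodup_keys_empty
    set ks : List Int := PySem.List.sorted (PySem.Dict.keys G) (fun k => k) false with hks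
    have hks_lt : ks.Pairwise (· < ·) := by
      apply pv_pairwise_lt_of_le_nodup
      · exact PySem.List.sorted_pairwise (PySem.Dict.keys G) (fun k => k)
      · exact ((PySem.List.sorted_perm (PySem.Dict.keys G) (fun k => k) false).nodup_iff).mpr hkeys_nd
    have hcov : ∀ e ∈ F, e.1 ∈ ks := by
      intro e he
      rw [hks, PySem.List.mem_sorted, hG,
        PySem.Dict.keys_foldl_modify_key]
      rw [PySem.Set.mem_update]
      right
      exact List.mem_map.mpr ⟨e, he, rfl⟩
    have hbucket : ∀ k, PySem.Dict.getD G k [] = (F.filter (fun e => e.1 == k)).map (fun e => e.2) := by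
      intro k
      rw [hG, PySem.Dict.getD_foldl_modify_append, PySem.Dict.getD_empty]
      simp
    have hexp : ∀ k, (PySem.Dict.getD G k []).map (fun text => (k, text))
        = (F.filter (fun e => e.1 == k)).map (fun e => (k, e.2)) := by
      intro k
      rw [hbucket k, List.map_map]
      rfl
    calc PySem.List.sorted F (fun e => e.1) false
        = ks.flatMap (fun k => ((F.filter (fun e => e.1 == k)).map (fun e => (k, e.2)))) :=
          (pv_group_sort F ks hks_lt hcov).symm
      _ = ks.flatMap (fun k => (PySem.Dict.getD G k []).map (fun text => (k, text))) :=
          List.flatMap_congr (fun k _ => (hexp k).symm)
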